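-- pv_equiv track=rewrite | github.com/Derfei/Dependency-Aware-Computation-Offloading-for-Mobile-Edge-Computing-with-Edge-Cloud-Cooperation | Mobile/network/local_info_server.py | computer_energy_cost
-- ===== SOURCE A (Python) =====
-- def computer_energy_cost(timelist, offloadingpolicy, formertasklist):
--     energy_cost = 0
--
--     P0_network = 32
--     P1_network = 64
--
--     P0_cpu = 3500
--     P1_cpu = 6400
--
--     for i in range(len(offloadingpolicy)):
--         exute_time = timelist[i][1]-timelist[i][0]
--
--         if i == 0:
--             if offloadingpolicy[i] == 2:
--                 energy_cost += P0_cpu*exute_time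
--             else:
--                 energy_cost += P1_cpu*exute_time
--         else:
--             if offloadingpolicy[i] == offloadingpolicy[i-1]:
--                 if offloadingpolicy[i] == 2:
--                     energy_cost += P0_cpu * exute_time
--                 else:
--                     energy_cost += P1_cpu * exute_time
--             else:
--                 for j in formertasklist[i]:
--                     network_time = timelist[i][0] - timelist[j][1]
--                     if offloadingpolicy[i] == 2:
--                         energy_cost = energy_cost  + P0_network * network_time
--                     else:
--                         energy_cost = energy_cost  + P1_network * network_time
--                 if offloadingpolicy[i] == 2:
--                     energy_cost += P0_cpu * exute_time
--                 else:
--                     energy_cost += P1_cpu * exute_time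
--
--     return energy_cost
-- ===== SOURCE B (Python) =====
-- def computer_energy_cost(timelist, offloadingpolicy, formertasklist):
--     # Compute unweighted time aggregates, then apply power constants once at the end:
--     # cost = 6400*exec_total - 2900*exec_fast + 64*net_total - 32*net_fast
--     # (rate 3500 = 6400 - 2900 when policy == 2; net rate 32 = 64 - 32 when policy == 2).
--     n = len(offloadingpolicy)
--     exec_total = sum(timelist[i][1] - timelist[i][0] for i in range(n))
--     exec_fast = sum(timelist[i][1] - timelist[i][0]
--                     for i in range(n) if offloadingpolicy[i] == 2)
--     net_total = 0
--     net_fast = 0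
--     for i in range(1, n):
--         if offloadingpolicy[i] != offloadingpolicy[i - 1]:
--             delay = (len(formertasklist[i]) * timelist[i][0]
--                      - sum(timelist[j][1] for j in formertasklist[i]))
--             net_total += delay
--             if offloadingpolicy[i] == 2:
--                 net_fast += delay
--     return 6400 * exec_total - 2900 * exec_fast + 64 * net_total - 32 * net_fast
-- ===== Notes on version B (the rewrite author's own statement) =====
-- stated objective: alternative
-- what changed: B never selects a power rate per item: it accumulates four unweighted time aggregates (total execution time, execution time of policy-2 tasks, total switch delay, switch delay into policy-2 tasks) and returns the single linear combination 6400*exec_total - 2900*exec_fast + 64*net_total - 32*net_fast, instead of A's per-index branch tree adding rate*time at every step.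
import Mathlib
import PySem

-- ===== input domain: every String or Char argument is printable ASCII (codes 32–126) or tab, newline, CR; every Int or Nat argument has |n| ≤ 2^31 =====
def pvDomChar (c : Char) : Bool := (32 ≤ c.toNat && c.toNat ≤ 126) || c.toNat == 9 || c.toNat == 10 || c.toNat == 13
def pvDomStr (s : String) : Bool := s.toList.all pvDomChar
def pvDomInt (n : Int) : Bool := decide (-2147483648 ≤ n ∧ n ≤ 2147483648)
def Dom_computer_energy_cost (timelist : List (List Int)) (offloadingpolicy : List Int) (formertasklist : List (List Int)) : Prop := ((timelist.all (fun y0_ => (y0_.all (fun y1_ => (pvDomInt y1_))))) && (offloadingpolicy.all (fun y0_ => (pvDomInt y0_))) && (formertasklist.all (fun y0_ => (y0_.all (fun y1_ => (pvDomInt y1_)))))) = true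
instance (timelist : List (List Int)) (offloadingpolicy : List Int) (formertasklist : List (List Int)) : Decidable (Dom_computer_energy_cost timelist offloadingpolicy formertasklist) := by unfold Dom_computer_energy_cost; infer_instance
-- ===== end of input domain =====

-- B accumulates four unweighted time aggregates and applies the power constants once,
-- as the linear combination 6400*exec_total - 2900*exec_fast + 64*net_total - 32*net_fast,
-- instead of A's per-index branch tree adding rate*time at every step; objective: alternative.

-- shared element access: timelist[i][k] with Python index semantics (default 0/[] outside Pre_)
def pvCell (timelist : List (List Int)) (i : Int) (k : Int) : Int :=
  (PySem.List.pyGet? ((PySem.List.pyGet? timelist i).getD []) k).getD 0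

def pvPol (pol : List Int) (i : Nat) : Int := pol.getD i 0

-- ===== PORT A =====
def computer_energy_cost (timelist : List (List Int)) (offloadingpolicy : List Int) (formertasklist : List (List Int)) : Int :=
  (List.range offloadingpolicy.length).foldl (fun energy (i : Nat) =>
    let exute := pvCell timelist (i : Int) 1 - pvCell timelist (i : Int) 0
    if i = 0 then
      if pvPol offloadingpolicy i = 2 then energy + 3500 * exute else energy + 6400 * exute
    else
      if pvPol offloadingpolicy i = pvPol offloadingpolicy (i - 1) then
        if pvPol offloadingpolicy i = 2 then energy + 3500 * exute else energy + 6400 * exute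
      else
        let energy2 := (formertasklist.getD i []).foldl (fun e j =>
          let network_time := pvCell timelist (i : Int) 0 - pvCell timelist j 1
          if pvPol offloadingpolicy i = 2 then e + 32 * network_time else e + 64 * network_time) energy
        if pvPol offloadingpolicy i = 2 then energy2 + 3500 * exute else energy2 + 6400 * exute) 0

-- ===== PORT B =====
def computer_energy_cost_alt (timelist : List (List Int)) (offloadingpolicy : List Int) (formertasklist : List (List Int)) : Int :=
  let n := offloadingpolicy.length
  let exec_total := ((List.range n).map (fun i => pvCell timelist (i : Int) 1 - pvCell timelist (i : Int) 0)).sum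
  let exec_fast := (((List.range n).filter (fun i => pvPol offloadingpolicy i == 2)).map
      (fun i => pvCell timelist (i : Int) 1 - pvCell timelist (i : Int) 0)).sum
  let nets := (List.range' 1 (n - 1)).foldl (fun (acc : Int × Int) i =>
      if pvPol offloadingpolicy i ≠ pvPol offloadingpolicy (i - 1) then
        let delay := ((formertasklist.getD i []).length : Int) * pvCell timelist (i : Int) 0
            - ((formertasklist.getD i []).map (fun j => pvCell timelist j 1)).sum
        (acc.1 + delay, if pvPol offloadingpolicy i == 2 then acc.2 + delay else acc.2)
      else acc) ((0 : Int), (0 : Int))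
  6400 * exec_total - 2900 * exec_fast + 64 * nets.1 - 32 * nets.2

-- ===== PRECONDITION & SPEC =====
-- Pre_ is exactly where Python A returns without an IndexError: every index 0..n-1 hits a
-- timelist row of length ≥ 2, and on each policy-switch edge formertasklist[i] exists and
-- each j in it is a valid (possibly negative, Python-style) index of a row of length ≥ 2.
def Pre_computer_energy_cost (timelist : List (List Int)) (offloadingpolicy : List Int) (formertasklist : List (List Int)) : Prop :=
  offloadingpolicy.length ≤ timelist.length ∧
  (∀ i ∈ List.range offloadingpolicy.length, 2 ≤ (timelist.getD i []).length) ∧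
  (∀ i ∈ List.range offloadingpolicy.length, 0 < i →
    offloadingpolicy.getD i 0 ≠ offloadingpolicy.getD (i - 1) 0 →
      i < formertasklist.length ∧
      ∀ j ∈ formertasklist.getD i [],
        -(timelist.length : Int) ≤ j ∧ j < (timelist.length : Int) ∧
        2 ≤ ((PySem.List.pyGet? timelist j).getD []).length)
instance (timelist : List (List Int)) (offloadingpolicy : List Int) (formertasklist : List (List Int)) : Decidable (Pre_computer_energy_cost timelist offloadingpolicy formertasklist) := by unfold Pre_computer_energy_cost; infer_instance

def pvWitness_computer_energy_cost : List (List Int) × List Int × List (List Int) :=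
  ([[0, 1], [2, 3]], [2, 1], [[], [0]])

def Spec_computer_energy_cost (timelist : List (List Int)) (offloadingpolicy : List Int) (formertasklist : List (List Int)) (out : Int) : Prop := out = computer_energy_cost_alt timelist offloadingpolicy formertasklist
instance (timelist : List (List Int)) (offloadingpolicy : List Int) (formertasklist : List (List Int)) (out : Int) : Decidable (Spec_computer_energy_cost timelist offloadingpolicy formertasklist out) := by unfold Spec_computer_energy_cost; infer_instance

-- ===== CLAIM (what is proved, stated in full; the proofs are below) =====
def Claim_equal_computer_energy_cost : Prop := ∀ (timelist : List (List Int)) (offloadingpolicy : List Int) (formertasklist : List (List Int)), Dom_computer_energy_cost timelist offloadingpolicy formertasklist → Pre_computer_energy_cost timelist offloadingpolicy formertasklist → Spec_computer_energy_cost timelist offloadingpolicy formertasklist (computer_energy_cost timelist offloadingpolicy formertasklist)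

-- ===== LEMMAS AND PROOFS =====

-- B's value with the index bound n made a parameter (proof-only helper).
def pvB (timelist : List (List Int)) (pol : List Int) (ftl : List (List Int)) (n : Nat) : Int :=
  let exec_total := ((List.range n).map (fun i => pvCell timelist (i : Int) 1 - pvCell timelist (i : Int) 0)).sum
  let exec_fast := (((List.range n).filter (fun i => pvPol pol i == 2)).map
      (fun i => pvCell timelist (i : Int) 1 - pvCell timelist (i : Int) 0)).sum
  let nets := (List.range' 1 (n - 1)).foldl (fun (acc : Int × Int) i =>
      if pvPol pol i ≠ pvPol pol (i - 1) then
        let delay := ((ftl.getD i []).length : Int) * pvCell timelist (i : Int) 0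
            - ((ftl.getD i []).map (fun j => pvCell timelist j 1)).sum
        (acc.1 + delay, if pvPol pol i == 2 then acc.2 + delay else acc.2)
      else acc) ((0 : Int), (0 : Int))
  6400 * exec_total - 2900 * exec_fast + 64 * nets.1 - 32 * nets.2

-- A's inner network loop is rate * (len*t_i0 - sum of t_j1).
lemma inner_fold (c : Prop) [Decidable c] (a : Int) (g : Int → Int) (xs : List Int) (e : Int) :
    xs.foldl (fun acc j => if c then acc + 32 * (a - g j) else acc + 64 * (a - g j)) e
      = e + (if c then (32 : Int) else 64) * ((xs.length : Int) * a - (xs.map g).sum) := by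
  induction xs generalizing e with
  | nil => simp
  | cons x xs ih =>
      rw [List.foldl_cons, ih]
      split_ifs with h <;> · simp; ring

lemma foldA_eq (tl : List (List Int)) (pol : List Int) (ftl : List (List Int)) (n : Nat) (e : Int) :
    (List.range n).foldl (fun energy (i : Nat) =>
      let exute := pvCell tl (i : Int) 1 - pvCell tl (i : Int) 0
      if i = 0 then
        if pvPol pol i = 2 then energy + 3500 * exute else energy + 6400 * exute
      else
        if pvPol pol i = pvPol pol (i - 1) then
          if pvPol pol i = 2 then energy + 3500 * exute else energy + 6400 * exute
        else
          let energy2 := (ftl.getD i []).foldl (fun e j =>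
            let network_time := pvCell tl (i : Int) 0 - pvCell tl j 1
            if pvPol pol i = 2 then e + 32 * network_time else e + 64 * network_time) energy
          if pvPol pol i = 2 then energy2 + 3500 * exute else energy2 + 6400 * exute) e
    = e + pvB tl pol ftl n := by
  induction n generalizing e with
  | zero => simp [pvB]
  | succ n ih =>
      rw [List.range_succ, List.foldl_append, List.foldl_cons, List.foldl_nil, ih]
      unfold pvB
      simp only [List.range_succ, List.filter_append, List.filter_cons, List.filter_nil]
      by_cases h0 : n = 0
      · subst h0
        simp only [Nat.add_sub_cancel, List.range'_zero]
        by_cases h2 : pvPol pol 0 = 2 <;> simp [h2] <;> ring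
      · have hr : List.range' 1 ((n + 1) - 1) = List.range' 1 (n - 1) ++ [n] := by
          have : (n + 1) - 1 = (n - 1) + 1 := by omega
          rw [this, List.range'_concat]
          congr 1
          simp; omega
        rw [hr, List.foldl_append, List.foldl_cons, List.foldl_nil]
        simp only [if_neg h0]
        by_cases hp : pvPol pol n = pvPol pol (n - 1)
        · simp only [if_pos hp, if_neg (by simpa using hp : ¬ pvPol pol n ≠ pvPol pol (n - 1))]
          by_cases h2 : pvPol pol n = 2 <;> simp [h2] <;> ring
        · simp only [if_neg hp, if_pos hp]
          rw [inner_fold (pvPol pol n = 2) (pvCell tl (n : Int) 0) (fun j => pvCell tl j 1)]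
          by_cases h2 : pvPol pol n = 2 <;> simp [h2] <;> ring

-- ===== VERDICT (by name: the statement is the Claim_ definition above) =====
theorem computer_energy_cost_spec : Claim_equal_computer_energy_cost := by
  intro timelist offloadingpolicy formertasklist _ _
  unfold Spec_computer_energy_cost computer_energy_cost
  rw [foldA_eq]
  simp only [pvB, computer_energy_cost_alt]
  ring
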